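-- pv_equiv track=rewrite | github.com/starkjeffrey/naga-monorepo-v1-final | apps/backend/scripts/one-off/generate_school_emails_for_students.py | resolve_duplicates
-- ===== SOURCE A (Python) =====
-- def resolve_duplicates(students):
--     """Resolve duplicate emails by adding numbers."""
--     email_counts = {}
--
--     for student in students:
--         base_email = student["proposed_email"]
--
--         if base_email in email_counts:
--             # This is a duplicate, add number
--             email_counts[base_email] += 1
--             # Change from user@domain to user2@domain, user3@domain, etc.
--             user_part, domain_part = base_email.split("@")
--             numbered_email = f"{user_part}{email_counts[base_email]}@{domain_part}"
--             student["proposed_email"] = numbered_email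
--         else:
--             email_counts[base_email] = 1
--
--     return students
-- ===== SOURCE B (Python) =====
-- def resolve_duplicates(students):
--     """Resolve duplicate emails by adding numbers."""
--     # Pass 1: group student indices by their (original) proposed email.
--     groups = {}
--     for idx, student in enumerate(students):
--         groups.setdefault(student["proposed_email"], []).append(idx)
--     # Pass 2: derive the numbered email for every non-first member of a group.
--     renames = {}
--     for email, idxs in groups.items():
--         if len(idxs) > 1:
--             user_part, domain_part = email.split("@")
--             for pos, idx in enumerate(idxs[1:], 2):
--                 renames[idx] = f"{user_part}{pos}@{domain_part}"
--     # Pass 3: apply the renames.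
--     for idx, student in enumerate(students):
--         if idx in renames:
--             student["proposed_email"] = renames[idx]
--     return students
-- ===== Notes on version B (the rewrite author's own statement) =====
-- stated objective: alternative
-- what changed: B replaces A's single stateful scan with a running counter dict by three staged passes: build an index dict mapping each original email to the ordered list of student indices sharing it, then derive a rename for every non-first member of each group, then apply the renames positionally.
import Mathlib
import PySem

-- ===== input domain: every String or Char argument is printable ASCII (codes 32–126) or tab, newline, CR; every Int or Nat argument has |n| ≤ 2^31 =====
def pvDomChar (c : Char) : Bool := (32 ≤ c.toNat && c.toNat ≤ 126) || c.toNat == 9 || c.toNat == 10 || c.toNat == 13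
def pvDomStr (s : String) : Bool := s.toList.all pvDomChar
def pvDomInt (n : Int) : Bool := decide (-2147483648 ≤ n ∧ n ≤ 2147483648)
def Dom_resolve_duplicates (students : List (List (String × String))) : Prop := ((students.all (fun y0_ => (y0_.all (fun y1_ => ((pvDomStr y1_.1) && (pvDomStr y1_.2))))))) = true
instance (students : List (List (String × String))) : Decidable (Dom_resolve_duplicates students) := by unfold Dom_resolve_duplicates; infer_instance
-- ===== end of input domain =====

-- B replaces A's single stateful counter scan by three staged passes (group student
-- indices by original email, derive the renames per group, apply them); objective:
-- alternative, not faster. Both Pythons mutate the student dicts in place — the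
-- equivalence proved here is about the returned value.

-- ===== PORT A =====
-- step of A's loop: state = (email_counts, output accumulator)
def resolveStepA (st : PySem.Dict String Int × List (List (String × String)))
    (student : List (String × String)) :
    PySem.Dict String Int × List (List (String × String)) :=
  let base := (PySem.Dict.mk student).getD "proposed_email" ""   -- student["proposed_email"]; KeyError (excluded by Pre_) if absent
  if (st.1.contains base) then
    let counts := st.1.modify base 0 (· + 1)                     -- email_counts[base_email] += 1
    let n := counts.getD base 0
    match PySem.Str.split? base "@" with
    | some [u, d] =>                                             -- exactly-two-parts unpack; else ValueError (excluded by Pre_)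
        (counts, st.2 ++ [((PySem.Dict.mk student).insert "proposed_email"
          (u ++ PySem.Int.toStr n ++ "@" ++ d)).items])
    | _ => (counts, st.2 ++ [student])
  else
    (st.1.insert base 1, st.2 ++ [student])

def resolve_duplicates (students : List (List (String × String))) : List (List (String × String)) :=
  (students.foldl resolveStepA (PySem.Dict.empty, [])).2

-- ===== PORT B =====
-- pass 1 step: groups.setdefault(student["proposed_email"], []).append(idx)
def groupStepB (d : PySem.Dict String (List Int)) (p : Int × List (String × String)) :
    PySem.Dict String (List Int) :=
  d.modify ((PySem.Dict.mk p.2).getD "proposed_email" "") [] (· ++ [p.1])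

-- pass 2 step: one group (email, idxs); records renames[idx] for every non-first idx
def renameGroupB (r : PySem.Dict Int String) (g : String × List Int) :
    PySem.Dict Int String :=
  if 1 < g.2.length then
    match PySem.Str.split? g.1 "@" with
    | some [u, d] =>                                             -- user, domain = email.split("@"); else ValueError (excluded by Pre_)
        (PySem.List.enumerate (PySem.List.slice g.2 (some 1) none) 2).foldl
          (fun r q => r.insert q.2 (u ++ PySem.Int.toStr q.1 ++ "@" ++ d)) r
    | _ => r
  else r

-- pass 3 step: if idx in renames: student["proposed_email"] = renames[idx]
def applyRenB (renames : PySem.Dict Int String) (p : Int × List (String × String)) :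
    List (String × String) :=
  if renames.contains p.1 then
    ((PySem.Dict.mk p.2).insert "proposed_email" (renames.getD p.1 "")).items
  else p.2

def resolve_duplicates_alt (students : List (List (String × String))) :
    List (List (String × String)) :=
  let groups := (PySem.List.enumerate students 0).foldl groupStepB PySem.Dict.empty
  let renames := groups.items.foldl renameGroupB PySem.Dict.empty
  (PySem.List.enumerate students 0).map (applyRenB renames)

-- ===== PRECONDITION & SPEC =====
-- Pre_ excludes exactly the inputs where A raises: a student without the
-- "proposed_email" key (KeyError), and a duplicated email that does not contain
-- exactly one '@' (ValueError on the two-way unpack of split("@")).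
def Pre_resolve_duplicates (students : List (List (String × String))) : Prop :=
  (∀ s ∈ students, (PySem.Dict.mk s).contains "proposed_email" = true) ∧
  (∀ s ∈ students,
    2 ≤ (students.map (fun t => (PySem.Dict.mk t).getD "proposed_email" "")).count
          ((PySem.Dict.mk s).getD "proposed_email" "") →
    PySem.Str.count ((PySem.Dict.mk s).getD "proposed_email" "") "@" = 1)
instance (students : List (List (String × String))) : Decidable (Pre_resolve_duplicates students) := by
  unfold Pre_resolve_duplicates; infer_instance

def pvWitness_resolve_duplicates : (List (List (String × String))) :=
  [[("proposed_email", "a@d.com")], [("proposed_email", "a@d.com")], [("proposed_email", "b@d.com")]]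

def Spec_resolve_duplicates (students : List (List (String × String))) (out : List (List (String × String))) : Prop := out = resolve_duplicates_alt students
instance (students : List (List (String × String))) (out : List (List (String × String))) : Decidable (Spec_resolve_duplicates students out) := by unfold Spec_resolve_duplicates; infer_instance

-- ===== CLAIM (what is proved, stated in full; the proofs are below) =====
def Claim_equal_resolve_duplicates : Prop := ∀ (students : List (List (String × String))), Dom_resolve_duplicates students → Pre_resolve_duplicates students → Spec_resolve_duplicates students (resolve_duplicates students)

-- ===== LEMMAS AND PROOFS =====

-- the email a student record proposes
def emOf (s : List (String × String)) : String := (PySem.Dict.mk s).getD "proposed_email" ""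


def occ (a : Int) (es : List String) (e : String) : List Int :=
  ((PySem.List.enumerate es a).filter (fun p => p.2 == e)).map (·.1)

theorem occ_cons (a : Int) (x : String) (es : List String) (e : String) :
    occ a (x :: es) e = (if x = e then [a] else []) ++ occ (a + 1) es e := by
  by_cases h : x = e <;> simp [occ, PySem.List.enumerate_cons, h]

theorem occ_take (es : List String) : ∀ (a : Int) (j : Nat) (e : String), es[j]? = some e →
    (occ a es e)[(es.take j).count e]? = some (a + j) := by
  induction es with
  | nil => intro a j e h; simp at h
  | cons x t ih =>
    intro a j e h
    rw [occ_cons]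
    cases j with
    | zero =>
      simp at h
      simp [h]
    | succ j =>
      simp at h
      have hih := ih (a + 1) j e h
      by_cases hx : x = e
      · have hcnt : ((x :: t).take (j + 1)).count e = (t.take j).count e + 1 := by
          simp [List.count_cons, hx]
        rw [hcnt]
        simp only [hx, if_pos rfl, List.singleton_append, List.getElem?_cons_succ]
        simpa [add_assoc, add_comm, add_left_comm] using hih
      · have hcnt : ((x :: t).take (j + 1)).count e = (t.take j).count e := by
          simp [List.count_cons, hx]
        rw [hcnt]
        simp only [if_neg hx, List.nil_append]
        simpa [add_assoc, add_comm, add_left_comm] using hih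


theorem enumerate_map {α β : Type} (f : α → β) (xs : List α) : ∀ s : Int,
    PySem.List.enumerate (xs.map f) s = (PySem.List.enumerate xs s).map (fun p => (p.1, f p.2)) := by
  induction xs with
  | nil => intro s; simp [PySem.List.enumerate_nil]
  | cons x t ih => intro s; simp [PySem.List.enumerate_cons, ih]

theorem groups_getD (students : List (List (String × String))) (e : String) :
    ((PySem.List.enumerate students 0).foldl groupStepB PySem.Dict.empty).getD e [] =
      occ 0 (students.map emOf) e := by
  have h1 : (PySem.List.enumerate students 0).foldl groupStepB PySem.Dict.empty =
      ((PySem.List.enumerate students 0).map (fun p => (emOf p.2, p.1))).foldl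
        (fun d q => d.modify q.1 [] (· ++ [q.2])) PySem.Dict.empty := by
    rw [List.foldl_map]; rfl
  rw [h1, PySem.Dict.getD_foldl_modify_append, PySem.Dict.getD_empty]
  simp only [occ, enumerate_map emOf students 0]
  simp [List.filter_map, List.map_map, Function.comp_def]

theorem groups_keys (students : List (List (String × String))) :
    ((PySem.List.enumerate students 0).foldl groupStepB PySem.Dict.empty).keys =
      PySem.Set.ofList (students.map emOf) := by
  show ((PySem.List.enumerate students 0).foldl
      (fun d p => d.modify ((PySem.Dict.mk p.2).getD "proposed_email" "") [] (· ++ [p.1]))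
      PySem.Dict.empty).keys = _
  rw [PySem.Dict.keys_foldl_modify_key]
  have h2 : (PySem.List.enumerate students 0).map
      (fun p => (PySem.Dict.mk p.2).getD "proposed_email" "") = students.map emOf := by
    have h := PySem.List.map_snd_enumerate students (0 : Int)
    rw [show (fun (p : Int × List (String × String)) => (PySem.Dict.mk p.2).getD "proposed_email" "") = emOf ∘ (·.2) from rfl,
      ← List.map_map, h]
  rw [h2, PySem.Dict.keys_empty]
  rfl

theorem occ_mem (es : List String) : ∀ (a i : Int) (e : String), i ∈ occ a es e →
    ∃ j : Nat, j < es.length ∧ i = a + j ∧ es[j]? = some e := by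
  induction es with
  | nil => intro a i e h; simp [occ] at h
  | cons x t ih =>
    intro a i e h
    rw [occ_cons] at h
    rcases List.mem_append.1 h with h1 | h2
    · by_cases hx : x = e
      · simp [hx] at h1
        exact ⟨0, by simp, by simp [h1], by simp [hx]⟩
      · simp [hx] at h1
    · obtain ⟨j, hj, hi, hget⟩ := ih (a + 1) i e h2
      exact ⟨j + 1, by simpa using hj, by omega, by simpa using hget⟩

theorem occ_pairwise (es : List String) : ∀ (a : Int) (e : String),
    (occ a es e).Pairwise (· < ·) := by
  induction es with
  | nil => intro a e; simp [occ]
  | cons x t ih =>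
    intro a e
    rw [occ_cons]
    have hgt : ∀ i ∈ occ (a + 1) t e, a < i := by
      intro i hi
      obtain ⟨j, _, hij, _⟩ := occ_mem t (a + 1) i e hi
      omega
    by_cases hx : x = e
    · simpa [hx] using (List.pairwise_cons.2 ⟨hgt, ih (a + 1) e⟩)
    · simpa [hx] using ih (a + 1) e

def renVal (pre : List String) (e : String) : Option String :=
  if 0 < pre.count e then
    match PySem.Str.split? e "@" with
    | some [u, d] => some (u ++ PySem.Int.toStr ((pre.count e : Int) + 1) ++ "@" ++ d)
    | _ => none
  else none


theorem get?_foldl_insert_of_forall_ne (P : List (Int × String)) :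
    ∀ (r : PySem.Dict Int String) (j : Int), (∀ q ∈ P, q.1 ≠ j) →
    (P.foldl (fun r q => r.insert q.1 q.2) r).get? j = r.get? j := by
  induction P with
  | nil => intro r j _; rfl
  | cons q t ih =>
    intro r j h
    rw [List.foldl_cons, ih _ j (fun p hp => h p (List.mem_cons_of_mem _ hp)),
      PySem.Dict.get?_insert_of_ne _ _ (Ne.symm (h q List.mem_cons_self))]

theorem get?_foldl_insert_of_mem (P : List (Int × String)) :
    ∀ (r : PySem.Dict Int String) (j : Int) (v : String), (j, v) ∈ P →
    (P.map (·.1)).Nodup →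
    (P.foldl (fun r q => r.insert q.1 q.2) r).get? j = some v := by
  induction P with
  | nil => intro r j v h _; simp at h
  | cons q t ih =>
    intro r j v h hnd
    simp only [List.map_cons, List.nodup_cons] at hnd
    rcases List.mem_cons.1 h with rfl | hmem
    · rw [List.foldl_cons]
      have hkeys : ∀ p ∈ t, p.1 ≠ j := by
        intro p hp hpj
        exact hnd.1 (List.mem_map.2 ⟨p, hp, hpj⟩)
      rw [get?_foldl_insert_of_forall_ne t _ j hkeys]
      simp [PySem.Dict.get?_insert_self]
    · rw [List.foldl_cons]
      exact ih _ j v hmem hnd.2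

-- keys inserted by one group's inner fold lie in g.2.tail

theorem renameGroup_get?_notmem (r : PySem.Dict Int String) (g : String × List Int) (j : Int)
    (h : j ∉ g.2.tail) : (renameGroupB r g).get? j = r.get? j := by
  unfold renameGroupB
  split
  · split
    next u d hsp =>
      rw [PySem.List.slice_from_one]
      have hfold : (PySem.List.enumerate g.2.tail 2).foldl
          (fun r q => r.insert q.2 (u ++ PySem.Int.toStr q.1 ++ "@" ++ d)) r =
          ((PySem.List.enumerate g.2.tail 2).map
            (fun q => (q.2, u ++ PySem.Int.toStr q.1 ++ "@" ++ d))).foldl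
            (fun r q => r.insert q.1 q.2) r := by
        rw [List.foldl_map]
      rw [hfold, get?_foldl_insert_of_forall_ne]
      intro q hq hqj
      apply h
      rcases List.mem_map.1 hq with ⟨p, hp, rfl⟩
      have hm : p.2 ∈ (PySem.List.enumerate g.2.tail 2).map (·.2) := List.mem_map_of_mem hp
      rw [PySem.List.map_snd_enumerate] at hm
      exact hqj ▸ hm
    next => rfl
  · rfl

theorem nodup_tail_occ (es : List String) (e : String) : (occ 0 es e).tail.Nodup :=
  ((occ_pairwise es 0 e).sublist (List.tail_sublist _)).imp (fun h => ne_of_lt h)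

theorem renameGroup_get?_self_some (es : List String) (j : Nat) (e0 u d : String)
    (r : PySem.Dict Int String) (hj : es[j]? = some e0)
    (hk : 0 < (es.take j).count e0) (hsp : PySem.Str.split? e0 "@" = some [u, d]) :
    (renameGroupB r (e0, occ 0 es e0)).get? (j : Int) =
      some (u ++ PySem.Int.toStr (((es.take j).count e0 : Int) + 1) ++ "@" ++ d) := by
  have hocc := occ_take es 0 j e0 hj
  simp only [zero_add] at hocc
  set k := (es.take j).count e0 with hkdef
  set l0 := occ 0 es e0 with hl0
  obtain ⟨hklen, hget⟩ := List.getElem?_eq_some_iff.1 hocc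
  have hlen : 1 < l0.length := by omega
  unfold renameGroupB
  rw [if_pos (by simpa using hlen)]
  simp only [hsp]
  rw [PySem.List.slice_from_one]
  have hfold : (PySem.List.enumerate l0.tail 2).foldl
      (fun r q => r.insert q.2 (u ++ PySem.Int.toStr q.1 ++ "@" ++ d)) r =
      ((PySem.List.enumerate l0.tail 2).map
        (fun q => (q.2, u ++ PySem.Int.toStr q.1 ++ "@" ++ d))).foldl
        (fun r q => r.insert q.1 q.2) r := by
    rw [List.foldl_map]
  rw [hfold]
  apply get?_foldl_insert_of_mem
  · -- ((j:Int), value) is among the mapped pairs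
    apply List.mem_map.2
    refine ⟨((2 : Int) + (k - 1 : Nat), l0.tail[k-1]'(by simp [List.length_tail]; omega)), ?_, ?_⟩
    · exact (PySem.List.mem_enumerate_iff _ _ _).2 ⟨k - 1, by simp [List.length_tail]; omega, rfl⟩
    · have htail : l0.tail[k-1]'(by simp [List.length_tail]; omega) = (j : Int) := by
        have : l0.tail[k-1]'(by simp [List.length_tail]; omega) = l0[(k-1)+1]'(by omega) := by
          simp [List.getElem_tail]
        rw [this]
        have hk1 : k - 1 + 1 = k := by omega
        simp_rw [hk1]
        exact hget
      rw [htail]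
      have hcast : (2 : Int) + ((k - 1 : Nat) : Int) = (k : Int) + 1 := by omega
      rw [hcast]
  · have : ((PySem.List.enumerate l0.tail 2).map
        (fun q => (q.2, u ++ PySem.Int.toStr q.1 ++ "@" ++ d))).map (·.1) =
        (PySem.List.enumerate l0.tail 2).map (·.2) := by
      simp [List.map_map, Function.comp_def]
    rw [this, PySem.List.map_snd_enumerate]
    exact nodup_tail_occ es e0

theorem renameGroup_get?_self_none (es : List String) (j : Nat) (e0 : String)
    (r : PySem.Dict Int String) (hj : es[j]? = some e0)
    (hnone : renVal (es.take j) e0 = none) :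
    (renameGroupB r (e0, occ 0 es e0)).get? (j : Int) = r.get? (j : Int) := by
  by_cases hk : 0 < (es.take j).count e0
  · -- the split must have failed to produce exactly two parts
    unfold renameGroupB
    split
    · split
      next u d hsp =>
        exfalso
        rw [renVal, if_pos hk, hsp] at hnone
        simp at hnone
      next => rfl
    · rfl
  · -- j is the first occurrence of e0: it is the head of occ, not in its tail
    apply renameGroup_get?_notmem
    have hc0 : List.count e0 (List.take j es) = 0 := by omega
    have h0 := occ_take es 0 j e0 hj
    rw [hc0] at h0
    simp only [zero_add] at h0
    cases hl : occ 0 es e0 with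
    | nil => rw [hl] at h0; simp at h0
    | cons a t =>
      rw [hl] at h0
      simp at h0
      have hpw := occ_pairwise es 0 e0
      rw [hl] at hpw
      have hlt := (List.pairwise_cons.1 hpw).1
      intro hmem
      simp only [hl, List.tail_cons] at hmem
      exact absurd (h0 ▸ hlt _ hmem) (lt_irrefl _)

theorem renameGroup_get?_other (es : List String) (j : Nat) (e0 e : String)
    (hj : es[j]? = some e0) (hne : e ≠ e0) (r : PySem.Dict Int String) :
    (renameGroupB r (e, occ 0 es e)).get? (j : Int) = r.get? (j : Int) := by
  apply renameGroup_get?_notmem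
  intro hmem
  have hmem' : (j : Int) ∈ occ 0 es e := List.mem_of_mem_tail hmem
  obtain ⟨j', hj', hij, hget⟩ := occ_mem es 0 _ e hmem'
  have hjj : j' = j := by omega
  rw [hjj, hj] at hget
  exact hne (Option.some.inj hget).symm

theorem renameGroup_get?_self (es : List String) (j : Nat) (e0 : String)
    (r : PySem.Dict Int String) (hj : es[j]? = some e0) :
    (renameGroupB r (e0, occ 0 es e0)).get? (j : Int) =
      if (renVal (es.take j) e0).isSome then renVal (es.take j) e0
      else r.get? (j : Int) := by
  cases hv : renVal (es.take j) e0 with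
  | none => simp [renameGroup_get?_self_none es j e0 r hj hv]
  | some v =>
    rw [renVal] at hv
    by_cases hk : 0 < (es.take j).count e0
    · rw [if_pos hk] at hv
      cases hsp : PySem.Str.split? e0 "@" with
      | none => rw [hsp] at hv; simp at hv
      | some l =>
        rw [hsp] at hv
        rcases l with _ | ⟨u, _ | ⟨d, _ | _⟩⟩ <;> simp at hv
        rw [renameGroup_get?_self_some es j e0 u d r hj hk hsp]
        simp [hv]
    · rw [if_neg hk] at hv; simp at hv

theorem renames_fold_get? (es : List String) (j : Nat) (e0 : String) (hj : es[j]? = some e0) :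
    ∀ (L : List String), L.Nodup → ∀ (r : PySem.Dict Int String),
    ((L.map (fun e => (e, occ 0 es e))).foldl renameGroupB r).get? (j : Int) =
      if e0 ∈ L ∧ (renVal (es.take j) e0).isSome then renVal (es.take j) e0
      else r.get? (j : Int) := by
  intro L
  induction L with
  | nil => intro _ r; simp
  | cons e t ih =>
    intro hnd r
    simp only [List.map_cons, List.foldl_cons]
    rw [ih (List.nodup_cons.1 hnd).2 _]
    by_cases he : e = e0
    · subst he
      rw [renameGroup_get?_self es j e r hj]
      by_cases hs : (renVal (es.take j) e).isSome <;> by_cases hm : e ∈ t <;>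
        simp [hs, hm]
    · rw [renameGroup_get?_other es j e0 e hj he r]
      by_cases hs : (renVal (es.take j) e0).isSome <;> by_cases hm : e0 ∈ t <;>
        simp [hs, hm, he, Ne.symm he]

theorem groups_items (students : List (List (String × String))) :
    ((PySem.List.enumerate students 0).foldl groupStepB PySem.Dict.empty).items =
      (PySem.Set.ofList (students.map emOf)).map
        (fun e => (e, occ 0 (students.map emOf) e)) := by
  have hnd : ((PySem.List.enumerate students 0).foldl groupStepB PySem.Dict.empty).keys.Nodup := by
    show ((PySem.List.enumerate students 0).foldl
      (fun d p => d.modify ((PySem.Dict.mk p.2).getD "proposed_email" "") [] (· ++ [p.1]))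
      PySem.Dict.empty).keys.Nodup
    exact PySem.Dict.nodup_keys_foldl_modify_key _ _ _ _ _ (by simp [PySem.Dict.keys_empty])
  rw [PySem.Dict.items_eq_map_keys _ hnd [], groups_keys]
  exact List.map_congr_left (fun e _ => by rw [groups_getD])

def specElem (pre : List String) (s : List (String × String)) : List (String × String) :=
  match renVal pre (emOf s) with
  | some v => ((PySem.Dict.mk s).insert "proposed_email" v).items
  | none => s

def specGo (pre : List String) : List (List (String × String)) → List (List (String × String))
  | [] => []
  | s :: rest => specElem pre s :: specGo (pre ++ [emOf s]) rest

theorem specGo_getElem? (xs : List (List (String × String))) :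
    ∀ (pre : List String) (j : Nat),
    (specGo pre xs)[j]? = (xs[j]?).map (fun s => specElem (pre ++ (xs.take j).map emOf) s) := by
  induction xs with
  | nil => intro pre j; simp [specGo]
  | cons s rest ih =>
    intro pre j
    cases j with
    | zero => simp [specGo]
    | succ j => simp [specGo, ih (pre ++ [emOf s]) j]



theorem renames_get? (students : List (List (String × String))) (j : Nat)
    (s : List (String × String)) (hj : students[j]? = some s) :
    (((PySem.List.enumerate students 0).foldl groupStepB PySem.Dict.empty).items.foldl
        renameGroupB PySem.Dict.empty).get? (j : Int) =
      renVal ((students.map emOf).take j) (emOf s) := by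
  have hes : (students.map emOf)[j]? = some (emOf s) := by
    simp [List.getElem?_map, hj]
  rw [groups_items]
  rw [renames_fold_get? (students.map emOf) j (emOf s) hes _
    (PySem.Set.nodup_ofList _) PySem.Dict.empty]
  have hmem : emOf s ∈ PySem.Set.ofList (students.map emOf) := by
    rw [PySem.Set.mem_ofList]
    exact List.mem_of_getElem? hes
  cases hv : renVal ((students.map emOf).take j) (emOf s) <;>
    simp [hmem, hv, PySem.Dict.get?_empty]

theorem portB_eq_specGo (students : List (List (String × String))) :
    resolve_duplicates_alt students = specGo [] students := by
  apply List.ext_getElem?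
  intro j
  rw [specGo_getElem? students [] j]
  unfold resolve_duplicates_alt
  simp only [List.getElem?_map, PySem.List.getElem?_enumerate]
  cases hj : students[j]? with
  | none => simp
  | some s =>
    simp only [Option.map_some]
    congr 1
    have hren := renames_get? students j s hj
    rw [applyRenB]
    simp only [zero_add]
    rw [PySem.Dict.contains_eq_isSome_get?, PySem.Dict.getD_eq_get?_getD, hren]
    have hpre : ([] : List String) ++ (students.take j).map emOf =
        (students.map emOf).take j := by
      simp [List.map_take]
    rw [specElem, hpre]
    cases hv : renVal ((students.map emOf).take j) (emOf s) <;> simp [hv]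

-- A side: counts-dict invariant of A's loop
def InvA (pre : List String) (counts : PySem.Dict String Int) : Prop :=
  ∀ e, counts.contains e = decide (0 < pre.count e) ∧ counts.getD e 0 = (pre.count e : Int)

theorem count_append_single (e x : String) (pre : List String) :
    (pre ++ [x]).count e = pre.count e + (if e = x then 1 else 0) := by
  rw [List.count_append, List.count_singleton]
  by_cases h : e = x
  · simp [h]
  · simp [h, Ne.symm h]

theorem invA_step (pre : List String) (counts : PySem.Dict String Int)
    (hI : InvA pre counts) (b : String) :
    InvA (pre ++ [b]) (if 0 < pre.count b then counts.modify b 0 (· + 1) else counts.insert b 1) := by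
  intro e
  rw [count_append_single]
  by_cases hc : 0 < pre.count b <;> by_cases he : e = b <;>
    simp [hc, he, PySem.Dict.contains_modify, PySem.Dict.getD_modify,
      PySem.Dict.contains_insert, PySem.Dict.getD_insert, (hI e).1, (hI e).2, (hI b).2] <;>
    omega

theorem stepA_eq (pre : List String) (counts : PySem.Dict String Int)
    (acc : List (List (String × String))) (s : List (String × String))
    (hI : InvA pre counts) :
    resolveStepA (counts, acc) s =
      ((if 0 < pre.count (emOf s) then counts.modify (emOf s) 0 (· + 1) else counts.insert (emOf s) 1),
        acc ++ [specElem pre s]) := by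
  have hb : (PySem.Dict.mk s).getD "proposed_email" "" = emOf s := rfl
  by_cases hc : 0 < pre.count (emOf s)
  · have hcont : counts.contains (emOf s) = true := by rw [(hI (emOf s)).1]; simp [hc]
    have hn : counts.getD (emOf s) 0 = ((pre.count (emOf s) : Int)) := (hI (emOf s)).2
    cases hsp : PySem.Str.split? (emOf s) "@" with
    | none => simp [resolveStepA, specElem, renVal, hb, hcont, hc, hsp]
    | some l =>
      rcases l with _ | ⟨u, _ | ⟨d, _ | _⟩⟩ <;>
        simp [resolveStepA, specElem, renVal, hb, hcont, hn, hc, hsp]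
  · have hcont : counts.contains (emOf s) = false := by rw [(hI (emOf s)).1]; simp [hc]
    simp [resolveStepA, specElem, renVal, hb, hcont, hc]

theorem foldA_spec (xs : List (List (String × String))) :
    ∀ (pre : List String) (counts : PySem.Dict String Int) (acc : List (List (String × String))),
    InvA pre counts → (xs.foldl resolveStepA (counts, acc)).2 = acc ++ specGo pre xs := by
  induction xs with
  | nil => intro pre counts acc _; simp [specGo]
  | cons s rest ih =>
    intro pre counts acc hI
    rw [List.foldl_cons, stepA_eq pre counts acc s hI,
      ih (pre ++ [emOf s]) _ _ (invA_step pre counts hI (emOf s))]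
    simp [specGo]

theorem portA_eq_specGo (students : List (List (String × String))) :
    resolve_duplicates students = specGo [] students := by
  have hI : InvA [] PySem.Dict.empty := by
    intro e; simp [PySem.Dict.contains_empty, PySem.Dict.getD_empty]
  have hA := foldA_spec students [] PySem.Dict.empty [] hI
  simpa [resolve_duplicates] using hA

theorem main_eq (students : List (List (String × String))) :
    resolve_duplicates students = resolve_duplicates_alt students := by
  rw [portA_eq_specGo, portB_eq_specGo]

-- ===== VERDICT (by name: the statement is the Claim_ definition above) =====
theorem resolve_duplicates_spec : Claim_equal_resolve_duplicates := by
  intro students _ _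
  exact main_eq students
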